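-- pv_equiv track=rewrite | github.com/Mortal/complexity | ex.py | Loop5
-- ===== SOURCE A (Python) =====
-- def Loop5(n):
--     s = 1
--     i = 1
--     while i <= n:
--         for j in range(1, i + 1):
--             s = s + 1
--         i = i * 2
--     return s
-- ===== SOURCE B (Python) =====
-- def Loop5(n):
--     # closed form: the loop returns the smallest power of two > n (or 1 if n < 1)
--     return 1 if n < 1 else 2 ** n.bit_length()
-- ===== Notes on version B (the rewrite author's own statement) =====
-- stated objective: faster
-- what changed: Replaced the doubling while-loop with nested counting for-loop by the closed form 2**n.bit_length() (smallest power of two greater than n), 1 for n < 1.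
import Mathlib
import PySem

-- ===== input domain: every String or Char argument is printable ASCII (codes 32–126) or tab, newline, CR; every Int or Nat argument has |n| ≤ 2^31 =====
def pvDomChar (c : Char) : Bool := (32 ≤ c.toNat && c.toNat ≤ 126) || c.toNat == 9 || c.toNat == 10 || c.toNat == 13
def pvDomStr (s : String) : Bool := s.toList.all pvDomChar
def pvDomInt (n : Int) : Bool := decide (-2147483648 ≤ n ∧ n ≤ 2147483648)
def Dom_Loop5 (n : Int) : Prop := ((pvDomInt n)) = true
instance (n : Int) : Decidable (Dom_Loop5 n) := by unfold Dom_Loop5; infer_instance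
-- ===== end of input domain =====

-- B replaces A's doubling while-loop (with an inner counting for-loop) by the O(1)
-- closed form: smallest power of two greater than n (1 when n < 1).


-- ===== PORT A =====
-- while i <= n: for j in range(1, i+1): s = s + 1; i = i * 2
def Loop5.loop (n s i : Int) (hi : 1 ≤ i) : Int :=
  if h : i ≤ n then
    Loop5.loop n ((PySem.List.pyRange 1 (i + 1) 1).foldl (fun a _ => a + 1) s) (i * 2)
      (by omega)
  else s
termination_by (n + 1 - i).toNat
decreasing_by omega

def Loop5 (n : Int) : Int := Loop5.loop n 1 1 (by omega)

-- ===== PORT B =====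
-- return 1 if n < 1 else 2 ** n.bit_length()   (bit_length ported as Nat.size)
def Loop5_alt (n : Int) : Int := if n < 1 then 1 else 2 ^ n.toNat.size

-- ===== PRECONDITION & SPEC =====
def Spec_Loop5 (n : Int) (out : Int) : Prop := out = Loop5_alt n
instance (n : Int) (out : Int) : Decidable (Spec_Loop5 n out) := by unfold Spec_Loop5; infer_instance

-- ===== CLAIM (what is proved, stated in full; the proofs are below) =====
def Claim_equal_Loop5 : Prop := ∀ (n : Int), Dom_Loop5 n → Spec_Loop5 n (Loop5 n)

-- ===== LEMMAS AND PROOFS =====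

-- first member of the doubling sequence i, 2i, 4i, … that exceeds n
def pow2above (n i : Int) (hi : 1 ≤ i) : Int :=
  if h : i ≤ n then pow2above n (i * 2) (by omega) else i
termination_by (n + 1 - i).toNat
decreasing_by omega

theorem foldl_count {α : Type} (l : List α) (s : Int) :
    l.foldl (fun a _ => a + 1) s = s + l.length := by
  induction l generalizing s with
  | nil => simp
  | cons x xs ih => simp only [List.foldl, List.length_cons, ih]; omega

theorem loop_eq (n : Int) (k : Nat) :
    ∀ (i : Int) (hi : 1 ≤ i), (n + 1 - i).toNat = k →
      ∀ s, Loop5.loop n s i hi = s + pow2above n i hi - i := by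
  induction k using Nat.strong_induction_on with
  | _ k ih =>
    intro i hi hk s
    rw [Loop5.loop, pow2above]
    by_cases h : i ≤ n
    · rw [dif_pos h, dif_pos h]
      rw [ih (n + 1 - i * 2).toNat (by omega) (i * 2) (by omega) rfl]
      rw [foldl_count, PySem.List.length_pyRange_one]
      omega
    · rw [dif_neg h, dif_neg h]; omega

theorem pow2above_spec (n : Int) (k : Nat) :
    ∀ (i : Int) (hi : 1 ≤ i), (n + 1 - i).toNat = k →
      n < pow2above n i hi ∧ (pow2above n i hi = i ∨ pow2above n i hi ≤ 2 * n) ∧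
        ∃ m : ℕ, pow2above n i hi = i * 2 ^ m := by
  induction k using Nat.strong_induction_on with
  | _ k ih =>
    intro i hi hk
    rw [pow2above]
    by_cases h : i ≤ n
    · rw [dif_pos h]
      obtain ⟨h1, h2, m, hm⟩ :=
        ih (n + 1 - i * 2).toNat (by omega) (i * 2) (by omega) rfl
      refine ⟨h1, ?_, ⟨m + 1, by rw [hm]; ring⟩⟩
      rcases h2 with h2 | h2
      · right; omega
      · right; exact h2
    · rw [dif_neg h]
      exact ⟨by omega, Or.inl rfl, ⟨0, by ring⟩⟩

theorem pow2above_one (n : Int) : pow2above n 1 (by omega) = Loop5_alt n := by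
  unfold Loop5_alt
  by_cases hn : n < 1
  · have h1 : ¬ (1 ≤ n) := by omega
    rw [pow2above, dif_neg h1, if_pos hn]
  · rw [if_neg hn]
    have hn : 1 ≤ n := by omega
    obtain ⟨h1, h2, m, hm⟩ := pow2above_spec n (n + 1 - 1).toNat 1 (by omega) rfl
    simp only [one_mul] at hm
    rcases h2 with h2 | h2
    · exfalso; omega
    · -- 2^m with n < 2^m ≤ 2n forces m = n.toNat.size
      rw [hm] at h1 h2 ⊢
      have hc : ((2 : Int) ^ m) = ((2 ^ m : ℕ) : Int) := by push_cast; ring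
      rw [hc] at h1 h2 ⊢
      set N := n.toNat with hN
      have hNn : (N : Int) = n := Int.toNat_of_nonneg (by omega)
      have hlt : N < 2 ^ m := by omega
      have hle : 2 ^ m ≤ 2 * N := by omega
      have hN1 : 1 ≤ N := by omega
      have hm1 : 1 ≤ m := by
        by_contra hm0
        interval_cases m; omega
      have h1' : N.size ≤ m := Nat.size_le.mpr hlt
      have h2' : m ≤ N.size := by
        have hpow : 2 ^ (m - 1) ≤ N := by
          have : 2 ^ m = 2 * 2 ^ (m - 1) := by
            rw [← pow_succ']; congr 1; omega
          omega
        have := Nat.lt_size.mpr hpow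
        omega
      have hms : m = N.size := le_antisymm h2' h1'
      rw [hms]; push_cast; ring

-- ===== VERDICT (by name: the statement is the Claim_ definition above) =====
theorem Loop5_spec : Claim_equal_Loop5 := by
  intro n _
  unfold Spec_Loop5 Loop5
  rw [loop_eq n (n + 1 - 1).toNat 1 (by omega) rfl, pow2above_one]
  ring
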